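-- pv_equiv track=rewrite | github.com/nghiatt90/cs-practice | codesignal/teenine.py | teeNine
-- ===== SOURCE A (Python) =====
-- def teeNine(m):
--     z = '        abc def ghi jkl mno pqrstuv wxyz'
--
--     r = []
--     l = 0
--     c = 0
--     for x in map(lambda x: z.index(x.lower())//4 if x.isalpha() else x, m):
--         if isinstance(x, int):
--             q = z[x*4:x*4+4].strip()
--             if x == l:
--                 c += 1
--                 r[-1] = q[c%len(q)]
--             else:
--                 r.append(q[0])
--                 l = x
--                 c = 0
--         else:
--             r.append(x)
--             l = 0
--             c = 0
--
--     return ''.join(r)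
-- ===== SOURCE B (Python) =====
-- def teeNine(m):
--     def _group(ch):
--         for q in ('abc', 'def', 'ghi', 'jkl', 'mno', 'pqrs', 'tuv', 'wxyz'):
--             if ch in q:
--                 return q
--         return ''
--     out = []
--     i, n = 0, len(m)
--     while i < n:
--         ch = m[i]
--         if ch.isalpha():
--             q = _group(ch.lower())
--             j = i + 1
--             while j < n and m[j].isalpha() and _group(m[j].lower()) == q:
--                 j += 1
--             out.append(q[(j - i - 1) % len(q)])
--             i = j
--         else:
--             out.append(ch)
--             i += 1
--     return ''.join(out)
-- ===== Notes on version B (the rewrite author's own statement) =====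
-- stated objective: alternative
-- what changed: A's running last-group/count state machine that repeatedly overwrites r[-1] is replaced by a run-based group-then-reduce scan: each maximal same-key run of letters is measured once and its single cycled key character q[(k-1)%len(q)] is emitted directly.
import Mathlib
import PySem

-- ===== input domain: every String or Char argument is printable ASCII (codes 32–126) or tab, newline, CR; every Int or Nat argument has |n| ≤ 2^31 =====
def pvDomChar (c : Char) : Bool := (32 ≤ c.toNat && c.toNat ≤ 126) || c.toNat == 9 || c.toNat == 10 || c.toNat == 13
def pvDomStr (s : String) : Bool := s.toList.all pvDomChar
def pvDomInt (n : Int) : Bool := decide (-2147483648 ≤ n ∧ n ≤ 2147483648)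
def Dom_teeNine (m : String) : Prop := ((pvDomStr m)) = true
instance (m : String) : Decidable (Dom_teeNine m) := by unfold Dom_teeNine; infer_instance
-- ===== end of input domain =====

-- B replaces A's running last-group/count state machine (which rewrites r[-1] in place) by a
-- group-then-reduce decomposition: scan each maximal same-key run once and emit its cycled key
-- directly (objective: alternative decomposition, same cost).

-- ===== PORT A =====
def teeNineZ : List Char := "        abc def ghi jkl mno pqrstuv wxyz".toList

-- the lambda in A's map: z.index(x.lower())//4 if x.isalpha() else x
-- (for an ASCII alpha char the index is always found, so the .getD 0 for index? is unreachable)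
def teeNineMapChar (x : Char) : Sum Int Char :=
  if PySem.Chars.isalpha x then
    Sum.inl (PySem.Int.floordiv
      (((PySem.List.index? teeNineZ (PySem.Chars.lowerChar x)).getD 0 : Nat) : Int) 4)
  else Sum.inr x

-- one iteration of A's for-loop on state (r, l, c)
def teeNineStep (st : List Char × Int × Int) (x : Sum Int Char) : List Char × Int × Int :=
  match x with
  | Sum.inl g =>
    let q := PySem.Chars.strip (PySem.List.slice teeNineZ (some (g * 4)) (some (g * 4 + 4)))
    if g = st.2.1 then
      let c := st.2.2 + 1
      (PySem.List.pySetD st.1 (-1)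
        (PySem.List.pyGetD q (PySem.Int.mod c ((q.length : Int))) ' '), st.2.1, c)
    else
      (st.1 ++ [PySem.List.pyGetD q 0 ' '], g, 0)
  | Sum.inr ch => (st.1 ++ [ch], 0, 0)

def teeNine (m : String) : String :=
  String.ofList (((m.toList.map teeNineMapChar).foldl teeNineStep ([], 0, 0)).1)

-- ===== PORT B =====
-- Source B's _group helper: first tuple entry containing ch, else ''
def altGroupGo (ch : Char) : List (List Char) → List Char
  | [] => []
  | q :: qs => if ch ∈ q then q else altGroupGo ch qs

def altGroup (ch : Char) : List Char :=
  altGroupGo ch ["abc".toList, "def".toList, "ghi".toList, "jkl".toList,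
                 "mno".toList, "pqrs".toList, "tuv".toList, "wxyz".toList]

-- the condition of Source B's inner while loop (j < n is the takeWhile/dropWhile bound)
def altRun (q : List Char) (d : Char) : Bool :=
  PySem.Chars.isalpha d && (altGroup (PySem.Chars.lowerChar d) == q)

-- Source B's outer while loop: each step consumes one maximal run (alpha) or one char (other)
def altGo : List Char → List Char
  | [] => []
  | ch :: rest =>
    if PySem.Chars.isalpha ch then
      let q := altGroup (PySem.Chars.lowerChar ch)
      let run := rest.takeWhile (altRun q)
      PySem.List.pyGetD q (PySem.Int.mod ((run.length : Int)) ((q.length : Int))) ' '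
        :: altGo (rest.dropWhile (altRun q))
    else ch :: altGo rest
termination_by cs => cs.length
decreasing_by
  · exact Nat.lt_succ_of_le (List.length_dropWhile_le _ _)
  · simp

def teeNine_alt (m : String) : String := String.ofList (altGo m.toList)

-- ===== PRECONDITION & SPEC =====
def Spec_teeNine (m : String) (out : String) : Prop := out = teeNine_alt m
instance (m : String) (out : String) : Decidable (Spec_teeNine m out) := by
  unfold Spec_teeNine; infer_instance

-- ===== CLAIM (what is proved, stated in full; the proofs are below) =====
def Claim_equal_teeNine : Prop := ∀ (m : String), Dom_teeNine m → Spec_teeNine m (teeNine m)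

-- ===== LEMMAS AND PROOFS =====

-- A's group index of an alpha char
def gA (ch : Char) : Int :=
  PySem.Int.floordiv (((PySem.List.index? teeNineZ (PySem.Chars.lowerChar ch)).getD 0 : Nat) : Int) 4

-- A's group string for group index g
def qA (g : Int) : List Char :=
  PySem.Chars.strip (PySem.List.slice teeNineZ (some (g * 4)) (some (g * 4 + 4)))

theorem mapChar_eq (x : Char) :
    teeNineMapChar x = if PySem.Chars.isalpha x then Sum.inl (gA x) else Sum.inr x := rfl

def pvLetters : List Char := "ABCDEFGHIJKLMNOPQRSTUVWXYZabcdefghijklmnopqrstuvwxyz".toList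

theorem ofNat_mem_upper : ∀ n, n < 91 → 65 ≤ n → Char.ofNat n ∈ pvLetters := by decide

theorem ofNat_mem_lower : ∀ n, n < 123 → 97 ≤ n → Char.ofNat n ∈ pvLetters := by decide

theorem alpha_mem (ch : Char) (h : PySem.Chars.isalpha ch = true) : ch ∈ pvLetters := by
  have h' := h
  simp [PySem.Chars.isalpha, PySem.Chars.isupper, PySem.Chars.islower,
        Char.le_def, UInt32.le_iff_toNat_le] at h'
  rcases h' with ⟨h1, h2⟩ | ⟨h1, h2⟩
  · have := ofNat_mem_upper ch.toNat (by exact Nat.lt_succ_of_le h2) h1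
    simpa [Char.ofNat_toNat] using this
  · have := ofNat_mem_lower ch.toNat (by exact Nat.lt_succ_of_le h2) h1
    simpa [Char.ofNat_toNat] using this

theorem letter_facts_bool : pvLetters.all (fun ch =>
    decide (2 ≤ gA ch) && decide (gA ch ≤ 9) &&
      (altGroup (PySem.Chars.lowerChar ch) == qA (gA ch)) &&
      ((qA (gA ch)).length != 0)) = true := by rfl

theorem letter_facts : ∀ ch ∈ pvLetters,
    2 ≤ gA ch ∧ gA ch ≤ 9 ∧ altGroup (PySem.Chars.lowerChar ch) = qA (gA ch) ∧
      (qA (gA ch)).length ≠ 0 := by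
  intro ch hch
  have h := letter_facts_bool
  rw [List.all_eq_true] at h
  have h' := h ch hch
  simp only [Bool.and_eq_true, decide_eq_true_eq, beq_iff_eq, bne_iff_ne, ne_eq] at h'
  exact ⟨h'.1.1.1, h'.1.1.2, h'.1.2, h'.2⟩

theorem char_facts (ch : Char) (h : PySem.Chars.isalpha ch = true) :
    2 ≤ gA ch ∧ gA ch ≤ 9 ∧ altGroup (PySem.Chars.lowerChar ch) = qA (gA ch) ∧
      (qA (gA ch)).length ≠ 0 :=
  letter_facts ch (alpha_mem ch h)

theorem qA_inj_bool : ((List.range' 2 8).all fun a => (List.range' 2 8).all fun b =>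
    (decide (a = b)) || !(qA (a : Int) == qA (b : Int))) = true := by rfl

theorem qA_inj (g h : Int) (hg2 : 2 ≤ g) (hg8 : g ≤ 9) (hh2 : 2 ≤ h) (hh8 : h ≤ 9)
    (he : qA g = qA h) : g = h := by
  have hgn : g = ((g.toNat : Nat) : Int) := (Int.toNat_of_nonneg (by omega)).symm
  have hhn : h = ((h.toNat : Nat) : Int) := (Int.toNat_of_nonneg (by omega)).symm
  have hb := qA_inj_bool
  rw [List.all_eq_true] at hb
  have h1 := hb g.toNat (by rw [List.mem_range'_1]; omega)
  rw [List.all_eq_true] at h1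
  have h2 := h1 h.toNat (by rw [List.mem_range'_1]; omega)
  simp only [Bool.or_eq_true, decide_eq_true_eq, Bool.not_eq_true', beq_eq_false_iff_ne,
    ne_eq] at h2
  rcases h2 with h2 | h2
  · omega
  · exact absurd (by rw [← hgn, ← hhn, he]) h2

theorem gA_eq_of_group_eq (c d : Char) (hc : PySem.Chars.isalpha c = true)
    (hd : PySem.Chars.isalpha d = true)
    (he : altGroup (PySem.Chars.lowerChar c) = altGroup (PySem.Chars.lowerChar d)) :
    gA c = gA d := by
  obtain ⟨hc2, hc8, hcq, -⟩ := char_facts c hc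
  obtain ⟨hd2, hd8, hdq, -⟩ := char_facts d hd
  exact qA_inj _ _ hc2 hc8 hd2 hd8 (by rw [← hcq, ← hdq, he])

theorem pySetD_last {α : Type} (xs : List α) (a v : α) :
    PySem.List.pySetD (xs ++ [a]) (-1) v = xs ++ [v] := by
  simp [PySem.List.pySetD, PySem.List.pySet?, PySem.List.pyIdx?]

-- processing a run of letters all in group g, from a state whose last char is already q's cycle at c
theorem runA (g : Int) (run : List Char)
    (hrun : ∀ d ∈ run, PySem.Chars.isalpha d = true ∧ gA d = g) :
    ∀ (r : List Char) (c : Int), 0 ≤ c →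
    (run.map teeNineMapChar).foldl teeNineStep
        (r ++ [PySem.List.pyGetD (qA g) (PySem.Int.mod c (((qA g).length : Int))) ' '], g, c)
      = (r ++ [PySem.List.pyGetD (qA g)
            (PySem.Int.mod (c + run.length) (((qA g).length : Int))) ' '], g, c + run.length) := by
  induction run with
  | nil => intro r c hc; simp
  | cons d ds ih =>
    intro r c hc
    obtain ⟨hda, hdg⟩ := hrun d (by simp)
    have hstep : teeNineMapChar d = Sum.inl g := by rw [mapChar_eq, if_pos hda, hdg]
    rw [List.map_cons, List.foldl_cons, hstep]
    show (ds.map teeNineMapChar).foldl teeNineStep (teeNineStep _ (Sum.inl g)) = _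
    rw [show teeNineStep
        (r ++ [PySem.List.pyGetD (qA g) (PySem.Int.mod c (((qA g).length : Int))) ' '], g, c)
        (Sum.inl g)
      = (r ++ [PySem.List.pyGetD (qA g)
            (PySem.Int.mod (c + 1) (((qA g).length : Int))) ' '], g, c + 1) from by
      simp [teeNineStep, pySetD_last, qA]]
    rw [ih (fun d hd => hrun d (by simp [hd])) r (c + 1) (by omega)]
    have harith : c + 1 + (ds.length : Int) = c + ((d :: ds).length : Int) := by
      simp only [List.length_cons]; push_cast; ring
    rw [harith]

theorem altGo_cons_alpha (ch : Char) (rest : List Char) (h : PySem.Chars.isalpha ch = true) :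
    altGo (ch :: rest) =
      PySem.List.pyGetD (altGroup (PySem.Chars.lowerChar ch))
        (PySem.Int.mod (((rest.takeWhile (altRun (altGroup (PySem.Chars.lowerChar ch)))).length : Int))
          (((altGroup (PySem.Chars.lowerChar ch)).length : Int))) ' '
        :: altGo (rest.dropWhile (altRun (altGroup (PySem.Chars.lowerChar ch)))) := by
  rw [altGo]; simp [h]

theorem altGo_cons_other (ch : Char) (rest : List Char) (h : PySem.Chars.isalpha ch = false) :
    altGo (ch :: rest) = ch :: altGo rest := by
  rw [altGo]; simp [h]

theorem mainA : ∀ (n : Nat) (cs : List Char), cs.length ≤ n → ∀ (r : List Char) (l c : Int),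
    (∀ d, cs.head? = some d → PySem.Chars.isalpha d = true → gA d ≠ l) →
    ((cs.map teeNineMapChar).foldl teeNineStep (r, l, c)).1 = r ++ altGo cs := by
  intro n
  induction n with
  | zero =>
    intro cs hlen r l c _
    have : cs = [] := List.length_eq_zero_iff.mp (Nat.le_zero.mp hlen)
    subst this; simp [altGo]
  | succ n ih =>
    intro cs hlen r l c hfresh
    match cs with
    | [] => simp [altGo]
    | ch :: rest =>
      by_cases ha : PySem.Chars.isalpha ch = true
      · -- alpha: one fresh step, then the rest of the run, then recurse
        obtain ⟨hg2, hg8, hgq, hql⟩ := char_facts ch ha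
        set g := gA ch with hgdef
        set q := altGroup (PySem.Chars.lowerChar ch) with hqdef
        have hne : g ≠ l := hfresh ch rfl ha
        have hstep : teeNineMapChar ch = Sum.inl g := by rw [mapChar_eq, if_pos ha]
        have hqpos : (0 : Int) < ((qA g).length : Int) := by
          have : (qA g).length ≠ 0 := hql
          omega
        rw [List.map_cons, List.foldl_cons, hstep]
        have hfirst : teeNineStep (r, l, c) (Sum.inl g)
            = (r ++ [PySem.List.pyGetD (qA g)
                (PySem.Int.mod 0 (((qA g).length : Int))) ' '], g, (0 : Int)) := by
          rw [show PySem.Int.mod 0 (((qA g).length : Int)) = 0 from by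
            rw [PySem.Int.mod_eq_emod_of_pos hqpos]; simp]
          simp [teeNineStep, if_neg hne, qA]
        rw [hfirst]
        -- split rest into the run and the remainder
        have hsplit : rest = rest.takeWhile (altRun q) ++ rest.dropWhile (altRun q) :=
          (List.takeWhile_append_dropWhile).symm
        conv_lhs => rw [hsplit]
        rw [List.map_append, List.foldl_append]
        have hrun : ∀ d ∈ rest.takeWhile (altRun q),
            PySem.Chars.isalpha d = true ∧ gA d = g := by
          intro d hd
          have hp := List.mem_takeWhile_imp hd
          simp only [altRun, Bool.and_eq_true, beq_iff_eq] at hp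
          refine ⟨hp.1, ?_⟩
          exact gA_eq_of_group_eq d ch hp.1 ha (by rw [hp.2, hqdef])
        rw [runA g _ hrun r 0 le_rfl]
        have hfresh' : ∀ d, (rest.dropWhile (altRun q)).head? = some d →
            PySem.Chars.isalpha d = true → gA d ≠ g := by
          intro d hd hda
          have hnp : altRun q d = false := by
            have := List.head?_dropWhile_not (altRun q) rest
            rw [hd] at this; exact this
          simp only [altRun, hda, Bool.true_and, beq_eq_false_iff_ne, ne_eq] at hnp
          intro hgg
          exact hnp (by rw [(char_facts d hda).2.2.1, hgg, ← hgq])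
        have hlen' : (rest.dropWhile (altRun q)).length ≤ n := by
          have h1 := List.length_dropWhile_le (altRun q) rest
          simp only [List.length_cons] at hlen
          omega
        rw [ih _ hlen' _ g _ hfresh']
        rw [altGo_cons_alpha ch rest ha]
        simp only [← hqdef, hgq, zero_add, List.append_assoc, List.cons_append,
          List.nil_append]
      · -- non-alpha: append the char, reset state
        have ha' : PySem.Chars.isalpha ch = false := by
          cases h : PySem.Chars.isalpha ch
          · rfl
          · exact absurd h ha
        have hstep : teeNineMapChar ch = Sum.inr ch := by rw [mapChar_eq, if_neg (by simp [ha'])]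
        rw [List.map_cons, List.foldl_cons, hstep]
        have : teeNineStep (r, l, c) (Sum.inr ch) = (r ++ [ch], 0, 0) := rfl
        rw [this]
        have hfresh0 : ∀ d, rest.head? = some d → PySem.Chars.isalpha d = true →
            gA d ≠ (0 : Int) := by
          intro d _ hda
          have := (char_facts d hda).1
          omega
        have hlen' : rest.length ≤ n := by simp only [List.length_cons] at hlen; omega
        rw [ih _ hlen' _ 0 0 hfresh0, altGo_cons_other ch rest ha']
        simp

-- ===== VERDICT (by name: the statement is the Claim_ definition above) =====
theorem teeNine_spec : Claim_equal_teeNine := by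
  intro m _
  unfold Spec_teeNine teeNine teeNine_alt
  have hfresh : ∀ d, m.toList.head? = some d → PySem.Chars.isalpha d = true →
      gA d ≠ (0 : Int) := by
    intro d _ hda
    have := (char_facts d hda).1
    omega
  rw [mainA m.toList.length m.toList le_rfl [] 0 0 hfresh]
  rfl
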